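-- pv_equiv track=rewrite | github.com/aaravsinhaofficial/MapShift | mapshift/baselines/heuristic.py | _apply_graph_updates
-- ===== SOURCE A (Python) =====
-- def _apply_graph_updates(
--
--     remembered_graph: dict[str, tuple[str, ...]],
--     operations: list[tuple[str, str, str]],
-- ) -> dict[str, tuple[str, ...]]:
--     mutable = {room_id: set(neighbors) for room_id, neighbors in remembered_graph.items()}
--     for op, left, right in operations:
--         mutable.setdefault(left, set())
--         mutable.setdefault(right, set())
--         if op == "add":
--             mutable[left].add(right)
--             mutable[right].add(left)
--         else:
--             mutable[left].discard(right)
--             mutable[right].discard(left)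
--     return {room_id: tuple(sorted(neighbors)) for room_id, neighbors in sorted(mutable.items())}
-- ===== SOURCE B (Python) =====
-- def _apply_graph_updates(
--     remembered_graph: dict[str, tuple[str, ...]],
--     operations: list[tuple[str, str, str]],
-- ) -> dict[str, tuple[str, ...]]:
--     nodes = set(remembered_graph)
--     edges = {(src, dst) for src, neighbors in remembered_graph.items() for dst in neighbors}
--     for op, left, right in operations:
--         nodes.add(left)
--         nodes.add(right)
--         if op == "add":
--             edges.add((left, right))
--             edges.add((right, left))
--         else:
--             edges.discard((left, right))
--             edges.discard((right, left))
--     result = {}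
--     for n in sorted(nodes):
--         result[n] = []
--     for src, dst in edges:
--         result[src].append(dst)
--     return {n: tuple(sorted(dsts)) for n, dsts in result.items()}
-- ===== Notes on version B (the rewrite author's own statement) =====
-- stated objective: alternative
-- what changed: Replaces the dict of per-node neighbor sets by a flat set of directed (src,dst) edge pairs plus a set of node ids; operations touch only these two sets and the adjacency lists are rebuilt at the end by filtering edges per sorted node.
import Mathlib
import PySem

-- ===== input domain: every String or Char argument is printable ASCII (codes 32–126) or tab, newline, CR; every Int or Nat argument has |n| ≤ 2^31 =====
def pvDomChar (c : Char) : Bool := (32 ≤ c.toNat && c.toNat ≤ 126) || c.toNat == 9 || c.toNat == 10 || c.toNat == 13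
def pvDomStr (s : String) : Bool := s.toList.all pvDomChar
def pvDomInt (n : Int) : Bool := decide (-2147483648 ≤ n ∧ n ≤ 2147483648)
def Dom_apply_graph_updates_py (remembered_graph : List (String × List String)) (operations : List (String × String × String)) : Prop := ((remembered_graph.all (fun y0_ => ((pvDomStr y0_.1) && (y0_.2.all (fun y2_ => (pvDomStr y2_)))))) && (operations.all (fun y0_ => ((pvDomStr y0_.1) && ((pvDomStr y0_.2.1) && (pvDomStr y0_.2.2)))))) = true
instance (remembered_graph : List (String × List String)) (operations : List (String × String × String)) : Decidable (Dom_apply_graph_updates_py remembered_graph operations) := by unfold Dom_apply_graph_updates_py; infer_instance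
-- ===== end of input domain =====

-- B replaces A's dict of per-node neighbor sets by a flat set of directed (src,dst) edge pairs
-- plus a set of node ids (alternative decomposition, similar cost).


-- ===== PORT A =====
-- one iteration of A's loop over operations (setdefault both endpoints, then add/discard in
-- both per-node sets; the in-place 'mutable[left].add(right)' is 'modify left (·.add right)')
def pvStepA (d : PySem.Dict String (PySem.Set String)) (t : String × String × String) : PySem.Dict String (PySem.Set String) :=
  let d1 := d.setdefault t.2.1 PySem.Set.empty
  let d2 := d1.setdefault t.2.2 PySem.Set.empty
  if t.1 == "add" then
    (d2.modify t.2.1 PySem.Set.empty (fun s => PySem.Set.add s t.2.2)).modify t.2.2 PySem.Set.empty (fun s => PySem.Set.add s t.2.1)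
  else
    (d2.modify t.2.1 PySem.Set.empty (fun s => PySem.Set.discard s t.2.2)).modify t.2.2 PySem.Set.empty (fun s => PySem.Set.discard s t.2.1)

-- Python sorts 'mutable.items()' by the whole (key, set) tuple; dict keys are unique, so the
-- comparison never reaches the second component: sorting by the key alone is exact.
def apply_graph_updates_py (remembered_graph : List (String × List String)) (operations : List (String × String × String)) : List (String × List String) :=
  let init : PySem.Dict String (PySem.Set String) :=
    remembered_graph.foldl (fun d p => d.insert p.1 (PySem.Set.ofList p.2)) PySem.Dict.empty
  let mutable := operations.foldl pvStepA init
  (PySem.List.sorted mutable.items (fun p => p.1)).map (fun p => (p.1, PySem.List.sorted p.2 (fun x => x)))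

-- ===== PORT B =====
-- one iteration of B's loop: record both endpoints as nodes, add/discard both directed edges
def pvStepB (st : PySem.Set String × PySem.Set (String × String)) (t : String × String × String) : PySem.Set String × PySem.Set (String × String) :=
  let nodes := PySem.Set.add (PySem.Set.add st.1 t.2.1) t.2.2
  let edges :=
    if t.1 == "add" then
      PySem.Set.add (PySem.Set.add st.2 (t.2.1, t.2.2)) (t.2.2, t.2.1)
    else
      PySem.Set.discard (PySem.Set.discard st.2 (t.2.1, t.2.2)) (t.2.2, t.2.1)
  (nodes, edges)

-- 'for src, dst in edges' iterates the edge set, but each collected list is sorted before it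
-- is returned, so the result does not depend on the set's iteration order: folding over the
-- Set's element list is exact.
def apply_graph_updates_py_alt (remembered_graph : List (String × List String)) (operations : List (String × String × String)) : List (String × List String) :=
  let nodes0 : PySem.Set String := PySem.Set.ofList (remembered_graph.map (fun p => p.1))
  let edges0 : PySem.Set (String × String) :=
    PySem.Set.ofList (remembered_graph.flatMap (fun p => p.2.map (fun dst => (p.1, dst))))
  let st := operations.foldl pvStepB (nodes0, edges0)
  let result0 := (PySem.List.sorted st.1 (fun x => x)).foldl
    (fun d n => d.insert n ([] : List String)) PySem.Dict.empty
  let result := st.2.foldl (fun d e => d.modify e.1 [] (fun dsts => dsts ++ [e.2])) result0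
  result.items.map (fun p => (p.1, PySem.List.sorted p.2 (fun x => x)))

-- ===== PRECONDITION & SPEC =====
-- Pre_ excludes association lists with duplicate keys: they do not represent a Python dict
-- (the function's declared argument type), so the a-side first argument is not reachable there.
def Pre_apply_graph_updates_py (remembered_graph : List (String × List String)) (operations : List (String × String × String)) : Prop :=
  (remembered_graph.map (fun p => p.1)).Nodup
instance (remembered_graph : List (String × List String)) (operations : List (String × String × String)) : Decidable (Pre_apply_graph_updates_py remembered_graph operations) := by unfold Pre_apply_graph_updates_py; infer_instance

def pvWitness_apply_graph_updates_py : (List (String × List String)) × (List (String × String × String)) :=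
  ([("a", ["b"])], [("add", "b", "c"), ("remove", "a", "b")])

def Spec_apply_graph_updates_py (remembered_graph : List (String × List String)) (operations : List (String × String × String)) (out : List (String × List String)) : Prop := out = apply_graph_updates_py_alt remembered_graph operations
instance (remembered_graph : List (String × List String)) (operations : List (String × String × String)) (out : List (String × List String)) : Decidable (Spec_apply_graph_updates_py remembered_graph operations out) := by unfold Spec_apply_graph_updates_py; infer_instance

-- ===== CLAIM (what is proved, stated in full; the proofs are below) =====
def Claim_equal_apply_graph_updates_py : Prop := ∀ (remembered_graph : List (String × List String)) (operations : List (String × String × String)), Dom_apply_graph_updates_py remembered_graph operations → Pre_apply_graph_updates_py remembered_graph operations → Spec_apply_graph_updates_py remembered_graph operations (apply_graph_updates_py remembered_graph operations)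

-- ===== LEMMAS AND PROOFS =====

-- the simulation relation between A's dict and B's (nodes, edges) pair: the node set is the
-- key list, and the snd-projection of the edges with source k is the set stored at k
def pvInv (d : PySem.Dict String (PySem.Set String)) (nodes : PySem.Set String) (edges : PySem.Set (String × String)) : Prop :=
  d.keys.Nodup ∧ nodes = d.keys ∧
  ∀ k, (edges.filter (fun e => e.1 == k)).map (fun e => e.2) = d.getD k PySem.Set.empty

-- discard is a filter, so it commutes with filter
theorem pv_filter_discard {α : Type} [BEq α] (s : List α) (x : α) (p : α → Bool) :
    (PySem.Set.discard s x).filter p = PySem.Set.discard (s.filter p) x := by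
  simp [PySem.Set.discard, List.filter_filter, Bool.and_comm]

theorem pv_discard_not_mem {α : Type} [BEq α] [LawfulBEq α] (s : List α) (x : α) (hx : x ∉ s) :
    PySem.Set.discard s x = s := by
  rw [PySem.Set.discard, List.filter_eq_self]
  intro a ha
  simp only [Bool.not_eq_eq_eq_not, Bool.not_true, beq_eq_false_iff_ne, ne_eq]
  rintro rfl; exact hx ha

-- on pairs whose first components all equal k, mapping snd commutes with discarding (k, r)
theorem pv_map_snd_discard (k r : String) (S : List (String × String)) (h : ∀ e ∈ S, e.1 = k) :
    (PySem.Set.discard S (k, r)).map (fun e => e.2) = PySem.Set.discard (S.map (fun e => e.2)) r := by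
  induction S with
  | nil => rfl
  | cons e S ih =>
    have he : e.1 = k := h e (by simp)
    have ih' := ih (fun x hx => h x (by simp [hx]))
    obtain ⟨e1, e2⟩ := e
    simp only at he; subst he
    simp only [PySem.Set.discard] at ih' ⊢
    by_cases hr : e2 = r
    · subst hr; simpa [List.filter_cons] using ih'
    · simp [hr, Prod.ext_iff, ih']

-- ofList commutes with filter
theorem pv_filter_ofList {α : Type} [BEq α] [LawfulBEq α] (xs : List α) (p : α → Bool) :
    (PySem.Set.ofList xs).filter p = PySem.Set.ofList (xs.filter p) := by
  induction xs with
  | nil => rfl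
  | cons x xs ih =>
    rw [PySem.Set.ofList_cons, List.filter_cons]
    by_cases hp : p x
    · simp [hp, PySem.Set.ofList_cons, pv_filter_discard, ih]
    · have hx : x ∉ PySem.Set.ofList (xs.filter p) := by
        simp only [PySem.Set.mem_ofList, List.mem_filter]
        rintro ⟨-, hpx⟩; exact hp hpx
      simp [hp, pv_filter_discard, ih, pv_discard_not_mem _ _ hx]

-- membership bridge: (l, r) ∈ edges ↔ r ∈ the snd-projection of the l-filtered edges
theorem pv_mem_proj (edges : List (String × String)) (l r : String) :
    r ∈ (edges.filter (fun e => e.1 == l)).map (fun e => e.2) ↔ (l, r) ∈ edges := by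
  constructor
  · rintro hm
    simp only [List.mem_map, List.mem_filter] at hm
    obtain ⟨e, ⟨he, hf⟩, hs⟩ := hm
    have : e = (l, r) := by obtain ⟨e1, e2⟩ := e; simp_all
    simpa [this] using he
  · intro hm
    exact List.mem_map.2 ⟨(l, r), List.mem_filter.2 ⟨hm, by simp⟩, rfl⟩

-- effect of adding one directed edge on the per-source projections
theorem pv_filter_add (edges : List (String × String)) (l r k : String) :
    ((PySem.Set.add edges (l, r)).filter (fun e => e.1 == k)).map (fun e => e.2)
      = if k = l then PySem.Set.add ((edges.filter (fun e => e.1 == l)).map (fun e => e.2)) r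
        else (edges.filter (fun e => e.1 == k)).map (fun e => e.2) := by
  by_cases hm : (l, r) ∈ edges
  · rw [PySem.Set.add_of_mem hm]
    split_ifs with hk
    · subst hk; rw [PySem.Set.add_of_mem ((pv_mem_proj edges k r).2 hm)]
    · rfl
  · rw [PySem.Set.add_of_not_mem hm, List.filter_append, List.map_append]
    split_ifs with hk
    · subst hk
      rw [PySem.Set.add_of_not_mem (fun hc => hm ((pv_mem_proj edges k r).1 hc))]
      simp
    · simp [Ne.symm hk]

-- effect of discarding one directed edge on the per-source projections
theorem pv_filter_del (edges : List (String × String)) (l r k : String) :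
    ((PySem.Set.discard edges (l, r)).filter (fun e => e.1 == k)).map (fun e => e.2)
      = if k = l then PySem.Set.discard ((edges.filter (fun e => e.1 == l)).map (fun e => e.2)) r
        else (edges.filter (fun e => e.1 == k)).map (fun e => e.2) := by
  rw [pv_filter_discard]
  split_ifs with hk
  · subst hk
    have hS : ∀ e ∈ edges.filter (fun e => e.1 == k), e.1 = k := by
      intro e he
      simpa using (List.mem_filter.1 he).2
    exact pv_map_snd_discard k r _ hS
  · rw [pv_discard_not_mem]
    intro hc
    have h1 : (l, r).1 = k := by simpa using (List.mem_filter.1 hc).2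
    exact hk h1.symm

-- snd-projection of a constant-source block of edges
theorem pv_map_snd_ofList (k : String) (ds : List String) :
    (PySem.Set.ofList (ds.map (fun d => (k, d)))).map (fun e => e.2) = PySem.Set.ofList ds := by
  induction ds with
  | nil => rfl
  | cons d ds ih =>
    rw [List.map_cons, PySem.Set.ofList_cons, PySem.Set.ofList_cons, List.map_cons]
    have hS : ∀ e ∈ PySem.Set.ofList (ds.map (fun d => (k, d))), e.1 = k := by
      intro e he
      obtain ⟨x, -, rfl⟩ := List.mem_map.1 ((PySem.Set.mem_ofList _ _).1 he)
      rfl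
    rw [pv_map_snd_discard k d _ hS, ih]

-- setdefault with the empty set never changes any getD-with-empty-default lookup
theorem pv_getD_setdefault (d : PySem.Dict String (PySem.Set String)) (k k' : String) :
    (d.setdefault k PySem.Set.empty).getD k' PySem.Set.empty = d.getD k' PySem.Set.empty := by
  by_cases h : k' = k
  · subst h; exact PySem.Dict.getD_setdefault_self d k' _ _
  · rw [PySem.Dict.getD_eq_get?_getD, PySem.Dict.get?_setdefault_of_ne d _ h, ← PySem.Dict.getD_eq_get?_getD]

-- one operation preserves the simulation relation
theorem pv_step (d : PySem.Dict String (PySem.Set String)) (nodes : PySem.Set String)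
    (edges : PySem.Set (String × String)) (t : String × String × String)
    (h : pvInv d nodes edges) : pvInv (pvStepA d t) (pvStepB (nodes, edges) t).1 (pvStepB (nodes, edges) t).2 := by
  obtain ⟨hnd, hkeys, hval⟩ := h
  obtain ⟨op, l, r⟩ := t
  simp only [pvStepA, pvStepB]
  have hkd2 : ((d.setdefault l PySem.Set.empty).setdefault r PySem.Set.empty).keys
      = PySem.Set.add (PySem.Set.add d.keys l) r := by
    rw [PySem.Dict.keys_setdefault, PySem.Dict.keys_setdefault, PySem.Dict.contains_setdefault]
    simp only [PySem.Set.add, PySem.Set.contains_eq_listContains, List.contains_eq_mem,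
      PySem.Dict.contains_eq_decide_mem_keys, PySem.Dict.keys_setdefault]
    by_cases hrl : r = l
    · subst hrl
      by_cases hl : r ∈ d.keys <;> simp [hl]
    · by_cases hl : l ∈ d.keys <;> by_cases hr : r ∈ d.keys <;>
        simp [hl, hr, hrl, PySem.Dict.contains_eq_decide_mem_keys]
  have hnd2 : ((d.setdefault l PySem.Set.empty).setdefault r PySem.Set.empty).keys.Nodup := by
    rw [hkd2]; exact PySem.Set.nodup_add _ r (PySem.Set.nodup_add _ l hnd)
  have hkeys2 : PySem.Set.add (PySem.Set.add nodes l) r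
      = ((d.setdefault l PySem.Set.empty).setdefault r PySem.Set.empty).keys := by
    rw [hkeys, hkd2]
  have hval2 : ∀ k, (edges.filter (fun e => e.1 == k)).map (fun e => e.2)
      = ((d.setdefault l PySem.Set.empty).setdefault r PySem.Set.empty).getD k PySem.Set.empty := by
    intro k; rw [pv_getD_setdefault, pv_getD_setdefault]; exact hval k
  have hcl : ((d.setdefault l PySem.Set.empty).setdefault r PySem.Set.empty).contains l = true := by
    simp [PySem.Dict.contains_setdefault]
  have hcr : ((d.setdefault l PySem.Set.empty).setdefault r PySem.Set.empty).contains r = true := by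
    simp [PySem.Dict.contains_setdefault]
  set d2 := (d.setdefault l PySem.Set.empty).setdefault r PySem.Set.empty with hd2
  split_ifs with hop
  all_goals {
    refine ⟨?_, ?_, ?_⟩
    · rw [PySem.Dict.keys_modify, PySem.Dict.keys_insert_of_contains _ _ (by simp [PySem.Dict.contains_modify, hcr]),
        PySem.Dict.keys_modify, PySem.Dict.keys_insert_of_contains _ _ hcl]
      exact hnd2
    · rw [PySem.Dict.keys_modify, PySem.Dict.keys_insert_of_contains _ _ (by simp [PySem.Dict.contains_modify, hcr]),
        PySem.Dict.keys_modify, PySem.Dict.keys_insert_of_contains _ _ hcl]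
      exact hkeys2
    · intro k
      simp only [pv_filter_add, pv_filter_del, PySem.Dict.getD_modify]
      split_ifs <;> simp [hval2]
  }

-- the whole loop preserves the simulation relation
theorem pv_loop (ops : List (String × String × String)) (d : PySem.Dict String (PySem.Set String))
    (nodes : PySem.Set String) (edges : PySem.Set (String × String)) (h : pvInv d nodes edges) :
    pvInv (ops.foldl pvStepA d) (ops.foldl pvStepB (nodes, edges)).1 (ops.foldl pvStepB (nodes, edges)).2 := by
  induction ops generalizing d nodes edges with
  | nil => exact h
  | cons t ops ih =>
    simp only [List.foldl_cons]
    have := ih (pvStepA d t) (pvStepB (nodes, edges) t).1 (pvStepB (nodes, edges) t).2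
      (pv_step d nodes edges t h)
    simpa using this

-- filtering the flattened directed-edge list by source
theorem pv_flat_filter (rg : List (String × List String)) (k : String) :
    (rg.flatMap (fun p => p.2.map (fun dst => (p.1, dst)))).filter (fun e => e.1 == k)
      = (rg.filter (fun p => p.1 == k)).flatMap (fun p => p.2.map (fun dst => (k, dst))) := by
  induction rg with
  | nil => rfl
  | cons p rg ih =>
    rw [List.flatMap_cons, List.filter_append, ih, List.filter_cons]
    by_cases hp : p.1 = k
    · simp [hp, List.filter_map, Function.comp_def]
    · simp [hp, List.filter_map, Function.comp_def]

-- the initial states are related (this is where the no-duplicate-keys precondition enters)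
theorem pv_init (rg : List (String × List String)) (hnd : (rg.map (fun p => p.1)).Nodup) :
    pvInv (rg.foldl (fun d p => d.insert p.1 (PySem.Set.ofList p.2)) PySem.Dict.empty)
      (PySem.Set.ofList (rg.map (fun p => p.1)))
      (PySem.Set.ofList (rg.flatMap (fun p => p.2.map (fun dst => (p.1, dst))))) := by
  have hitems : (rg.foldl (fun d p => d.insert p.1 (PySem.Set.ofList p.2)) PySem.Dict.empty).items
      = rg.map (fun p => (p.1, PySem.Set.ofList p.2)) := by
    have := PySem.Dict.items_foldl_insert_fresh rg (fun p => p.1) (fun p => PySem.Set.ofList p.2)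
      PySem.Dict.empty (fun a _ => PySem.Dict.contains_empty _) hnd
    simpa using this
  have hkeysi : (rg.foldl (fun d p => d.insert p.1 (PySem.Set.ofList p.2)) PySem.Dict.empty).keys
      = rg.map (fun p => p.1) := by
    simp only [PySem.Dict.keys, hitems, List.map_map]
    rfl
  refine ⟨by rw [hkeysi]; exact hnd, by rw [hkeysi, PySem.Set.ofList_eq_self_of_nodup _ hnd], ?_⟩
  intro k
  rw [pv_filter_ofList, pv_flat_filter]
  cases hf : rg.filter (fun p => p.1 == k) with
  | nil =>
    have hkm : k ∉ rg.map (fun p => p.1) := by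
      intro hm
      obtain ⟨p, hp, hpk⟩ := List.mem_map.1 hm
      have : p ∈ rg.filter (fun p => p.1 == k) := List.mem_filter.2 ⟨hp, by simp [hpk]⟩
      rw [hf] at this; exact absurd this (List.not_mem_nil)
    rw [PySem.Dict.getD_of_not_contains]
    · rfl
    · rw [PySem.Dict.contains_eq_decide_mem_keys, hkeysi]
      simpa using hkm
  | cons p rest =>
    have hpmem : p ∈ rg.filter (fun p => p.1 == k) := by rw [hf]; simp
    have hpk : p.1 = k := by simpa using (List.mem_filter.1 hpmem).2
    have hrg : p ∈ rg := (List.mem_filter.1 hpmem).1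
    have hrest : rest = [] := by
      have hsub0 : (rg.filter (fun p => p.1 == k)).Sublist rg := List.filter_sublist
      have hsub : ((rg.filter (fun p => p.1 == k)).map (fun p => p.1)).Nodup :=
        (hsub0.map (fun p => p.1)).nodup hnd
      rw [hf] at hsub
      cases rest with
      | nil => rfl
      | cons q rest' =>
        have hqmem : q ∈ rg.filter (fun p => p.1 == k) := by rw [hf]; simp
        have hqk : q.1 = k := by simpa using (List.mem_filter.1 hqmem).2
        simp only [List.map_cons, List.nodup_cons, List.mem_cons] at hsub
        exact absurd (Or.inl (hpk.trans hqk.symm)) hsub.1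
    subst hrest
    rw [List.flatMap_cons, List.flatMap_nil, List.append_nil, pv_map_snd_ofList]
    have hpitem : (k, PySem.Set.ofList p.2) ∈ (rg.foldl (fun d p => d.insert p.1 (PySem.Set.ofList p.2)) PySem.Dict.empty).items := by
      rw [hitems]
      exact List.mem_map.2 ⟨p, hrg, by rw [hpk]⟩
    rw [PySem.Dict.getD_of_mem_items _ hpitem (by rw [hkeysi]; exact hnd)]

-- for a dict with Nodup keys, sorting the items by key = mapping over the sorted keys
theorem pv_sorted_items (d : PySem.Dict String (PySem.Set String)) (hnd : d.keys.Nodup) :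
    PySem.List.sorted d.items (fun p => p.1)
      = (PySem.List.sorted d.keys (fun x => x)).map (fun k => (k, d.getD k PySem.Set.empty)) := by
  rw [PySem.Dict.items_eq_map_keys d hnd PySem.Set.empty]
  apply PySem.List.sorted_eq_of_perm_of_pairwise_lt
  · exact (PySem.List.sorted_perm d.keys (fun x => x) false).map _
  · rw [List.pairwise_map]
    have hlt : (PySem.List.sorted d.keys (fun x => x)).Pairwise (fun a b => a < b) := by
      have h1 := PySem.List.sorted_pairwise d.keys (fun x => x)
      have h2 : (PySem.List.sorted d.keys (fun x => x)).Nodup :=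
        (PySem.List.sorted_perm d.keys (fun x => x) false).nodup_iff.2 hnd
      exact (h1.and h2).imp (fun hab => lt_of_le_of_ne hab.1 hab.2)
    exact hlt

-- an insert-the-empty-list loop leaves every getD-with-[]-default lookup at []
theorem pv_getD_foldl_insert_nil (ns : List String) (d : PySem.Dict String (List String))
    (h : ∀ k, d.getD k ([] : List String) = []) (k : String) :
    (ns.foldl (fun d n => d.insert n ([] : List String)) d).getD k [] = [] := by
  induction ns generalizing d with
  | nil => exact h k
  | cons n ns ih =>
    rw [List.foldl_cons]
    refine ih _ (fun k' => ?_)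
    rw [PySem.Dict.getD_insert]
    split_ifs
    · rfl
    · exact h k'

-- from the simulation relation, A's final dict and B's regrouped dict render identically
theorem pv_final (M : PySem.Dict String (PySem.Set String)) (nodes : PySem.Set String)
    (edges : PySem.Set (String × String)) (h : pvInv M nodes edges) :
    (PySem.List.sorted M.items (fun p => p.1)).map (fun p => (p.1, PySem.List.sorted p.2 (fun x => x)))
      = ((edges.foldl (fun d e => d.modify e.1 [] (fun dsts => dsts ++ [e.2]))
          ((PySem.List.sorted nodes (fun x => x)).foldl
            (fun d n => d.insert n ([] : List String)) PySem.Dict.empty)).items).map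
          (fun p => (p.1, PySem.List.sorted p.2 (fun x => x))) := by
  obtain ⟨hnd, hkeys, hval⟩ := h
  subst hkeys
  have hnodup_sorted : (PySem.List.sorted M.keys (fun x => x)).Nodup :=
    (PySem.List.sorted_perm M.keys (fun x => x) false).nodup_iff.2 hnd
  have hk0 : ((PySem.List.sorted M.keys (fun x => x)).foldl
      (fun d n => d.insert n ([] : List String)) PySem.Dict.empty).keys
      = PySem.List.sorted M.keys (fun x => x) := by
    rw [PySem.Dict.keys_foldl_insert]
    rw [PySem.Dict.keys_empty, PySem.Set.update_nil_left,
      PySem.Set.ofList_eq_self_of_nodup _ hnodup_sorted]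
  have hsrc : ∀ e ∈ edges, e.1 ∈ M.keys := by
    intro e he
    by_contra hk
    have hc : M.contains e.1 = false := by
      rw [PySem.Dict.contains_eq_decide_mem_keys]; simpa using hk
    have h0 := hval e.1
    rw [PySem.Dict.getD_of_not_contains _ _ hc] at h0
    have : e.2 ∈ ((edges.filter (fun e' => e'.1 == e.1)).map (fun e' => e'.2)) :=
      List.mem_map.2 ⟨e, List.mem_filter.2 ⟨he, by simp⟩, rfl⟩
    rw [h0] at this
    exact absurd this (List.not_mem_nil)
  have hkB : (edges.foldl (fun d e => d.modify e.1 [] (fun dsts => dsts ++ [e.2]))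
      ((PySem.List.sorted M.keys (fun x => x)).foldl
        (fun d n => d.insert n ([] : List String)) PySem.Dict.empty)).keys
      = PySem.List.sorted M.keys (fun x => x) := by
    rw [PySem.Dict.keys_foldl_modify_key, hk0, PySem.Set.update_eq_append_filter]
    have hnil : ((PySem.Set.ofList (edges.map (fun e => e.1))).filter
        (fun y => !(PySem.Set.contains (PySem.List.sorted M.keys (fun x => x)) y))) = [] := by
      rw [List.filter_eq_nil_iff]
      intro x hx
      obtain ⟨e, he, rfl⟩ := List.mem_map.1 ((PySem.Set.mem_ofList _ _).1 hx)
      have hxk : e.1 ∈ PySem.List.sorted M.keys (fun x => x) :=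
        (PySem.List.mem_sorted _ _ _ _).2 (hsrc e he)
      simp [PySem.Set.contains_eq_listContains, List.contains_eq_mem, hxk]
    rw [hnil, List.append_nil]
  have hgB : ∀ k, (edges.foldl (fun d e => d.modify e.1 [] (fun dsts => dsts ++ [e.2]))
      ((PySem.List.sorted M.keys (fun x => x)).foldl
        (fun d n => d.insert n ([] : List String)) PySem.Dict.empty)).getD k []
      = (edges.filter (fun e => e.1 == k)).map (fun e => e.2) := by
    intro k
    rw [PySem.Dict.getD_foldl_modify_append,
      pv_getD_foldl_insert_nil _ _ (fun k' => PySem.Dict.getD_empty k' []) k, List.nil_append]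
  have hndB : (edges.foldl (fun d e => d.modify e.1 [] (fun dsts => dsts ++ [e.2]))
      ((PySem.List.sorted M.keys (fun x => x)).foldl
        (fun d n => d.insert n ([] : List String)) PySem.Dict.empty)).keys.Nodup := by
    rw [hkB]; exact hnodup_sorted
  rw [pv_sorted_items _ hnd]
  rw [PySem.Dict.items_eq_map_keys _ hndB ([] : List String), hkB]
  rw [List.map_map, List.map_map]
  apply List.map_congr_left
  intro k hk
  simp only [Function.comp]
  rw [hgB k, hval k]

-- ===== VERDICT (by name: the statement is the Claim_ definition above) =====
theorem apply_graph_updates_py_spec : Claim_equal_apply_graph_updates_py := by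
  intro rg ops _ hpre
  unfold Spec_apply_graph_updates_py
  simp only [apply_graph_updates_py, apply_graph_updates_py_alt]
  exact pv_final _ _ _ (pv_loop ops _ _ _ (pv_init rg hpre))
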